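-- pv_equiv track=rewrite | github.com/bjh-insitro/cell_OS | src/cell_os/contracts/causal_contract.py | _normalize_brackets
-- ===== SOURCE A (Python) =====
-- def _normalize_brackets(path: str) -> str:
--     """Normalize any [whatever] into [*] so patterns can match."""
--     out = []
--     i = 0
--     while i < len(path):
--         if path[i] == "[":
--             j = path.find("]", i + 1)
--             if j == -1:
--                 out.append(path[i:])
--                 break
--             out.append("[*]")
--             i = j + 1
--         else:
--             out.append(path[i])
--             i += 1
--     return "".join(out)
-- ===== SOURCE B (Python) =====
-- def _normalize_brackets(path: str) -> str:
--     """Normalize any [whatever] into [*] so patterns can match."""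
--     out = []
--     buf = None  # None = outside brackets; else chars seen since the opening '['
--     for ch in path:
--         if buf is None:
--             if ch == "[":
--                 buf = [ch]
--             else:
--                 out.append(ch)
--         else:
--             if ch == "]":
--                 out.append("[*]")
--                 buf = None
--             else:
--                 buf.append(ch)
--     if buf is not None:
--         out.append("".join(buf))  # unclosed '[': keep the tail verbatim
--     return "".join(out)
-- ===== Notes on version B (the rewrite author's own statement) =====
-- stated objective: alternative
-- what changed: Replaced the index-based while loop that jumps via str.find(']') with a single character-by-character state machine keeping an optional pending buffer that is flushed verbatim on an unclosed '['.
import Mathlib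
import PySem

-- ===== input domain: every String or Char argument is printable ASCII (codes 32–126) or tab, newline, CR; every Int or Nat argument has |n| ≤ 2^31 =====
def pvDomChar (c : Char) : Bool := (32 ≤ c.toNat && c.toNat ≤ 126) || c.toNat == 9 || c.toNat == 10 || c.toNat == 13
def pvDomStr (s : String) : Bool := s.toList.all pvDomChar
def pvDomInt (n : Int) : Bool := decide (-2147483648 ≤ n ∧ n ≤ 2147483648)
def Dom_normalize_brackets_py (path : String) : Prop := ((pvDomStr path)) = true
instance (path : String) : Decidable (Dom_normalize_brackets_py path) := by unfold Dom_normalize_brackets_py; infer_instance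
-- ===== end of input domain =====

-- B replaces A's find-based jumping with a per-character state machine holding a pending buffer (objective: alternative decomposition, same cost).

-- ===== PORT A =====
-- path.find("]", i+1): scan the remaining chars for ']', return the suffix after it (none = -1).
def pvFindClose (cs : List Char) : Option (List Char) :=
  match cs with
  | [] => none
  | c :: rest => if c = ']' then some rest else pvFindClose rest

-- termination helper for the port: the suffix after ']' is strictly shorter
theorem pvFindClose_length {cs after : List Char} (h : pvFindClose cs = some after) :
    after.length < cs.length := by
  induction cs with
  | nil => simp [pvFindClose] at h
  | cons c rest ih =>
    simp only [pvFindClose] at h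
    split at h
    · cases h; simp
    · exact Nat.lt_trans (ih h) (by simp)

-- the while loop of A, on the suffix of chars not yet consumed
def pvALoop : List Char → List Char
  | [] => []
  | c :: rest =>
    if c = '[' then
      match h : pvFindClose rest with
      | none => c :: rest                       -- out.append(path[i:]); break
      | some after => '[' :: '*' :: ']' :: pvALoop after  -- out.append("[*]"); i = j + 1
    else
      c :: pvALoop rest                         -- out.append(path[i]); i += 1
termination_by cs => cs.length
decreasing_by
  all_goals first
    | exact Nat.lt_succ_of_lt (pvFindClose_length h)
    | simp

def normalize_brackets_py (path : String) : String := String.mk (pvALoop path.toList)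

-- ===== PORT B =====
-- one state-machine step: state = (output so far, optional pending buffer)
def pvBStep (st : List Char × Option (List Char)) (c : Char) : List Char × Option (List Char) :=
  match st.2 with
  | none => if c = '[' then (st.1, some [c]) else (st.1 ++ [c], none)
  | some b => if c = ']' then (st.1 ++ ['[', '*', ']'], none) else (st.1, some (b ++ [c]))

def pvBFinish (st : List Char × Option (List Char)) : List Char :=
  match st.2 with
  | none => st.1
  | some b => st.1 ++ b

def normalize_brackets_py_alt (path : String) : String :=
  String.mk (pvBFinish (path.toList.foldl pvBStep ([], none)))

-- ===== PRECONDITION & SPEC =====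
def Spec_normalize_brackets_py (path : String) (out : String) : Prop := out = normalize_brackets_py_alt path
instance (path : String) (out : String) : Decidable (Spec_normalize_brackets_py path out) := by unfold Spec_normalize_brackets_py; infer_instance

-- ===== CLAIM (what is proved, stated in full; the proofs are below) =====
def Claim_equal_normalize_brackets_py : Prop := ∀ (path : String), Dom_normalize_brackets_py path → Spec_normalize_brackets_py path (normalize_brackets_py path)

-- ===== LEMMAS AND PROOFS =====

-- combined invariant for the fold: outside a bracket it produces pvALoop; inside
-- (pending buffer b) it produces what A produces from the point of the opening '['.
theorem pvB_invariant (cs : List Char) :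
    (∀ out, pvBFinish (cs.foldl pvBStep (out, none)) = out ++ pvALoop cs) ∧
    (∀ out b, pvBFinish (cs.foldl pvBStep (out, some b)) =
      out ++ (match pvFindClose cs with
              | none => b ++ cs
              | some after => '[' :: '*' :: ']' :: pvALoop after)) := by
  induction cs with
  | nil => exact ⟨fun out => by simp [pvBFinish, pvALoop],
                  fun out b => by simp [pvBFinish, pvFindClose]⟩
  | cons c rest ih =>
    constructor
    · intro out
      by_cases h : c = '['
      · subst h
        simp only [List.foldl_cons, pvBStep, reduceIte]
        rw [ih.2 out ['[']]
        simp only [pvALoop, pvFindClose]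
        cases pvFindClose rest <;> simp
      · simp only [List.foldl_cons, pvBStep]
        rw [if_neg h]
        rw [ih.1 (out ++ [c])]
        simp [pvALoop, h]
    · intro out b
      by_cases h : c = ']'
      · subst h
        simp only [List.foldl_cons, pvBStep, reduceIte]
        rw [ih.1 (out ++ ['[', '*', ']'])]
        simp [pvFindClose]
      · simp only [List.foldl_cons, pvBStep]
        rw [if_neg h]
        rw [ih.2 out (b ++ [c])]
        simp only [pvFindClose]
        rw [if_neg h]
        cases pvFindClose rest <;> simp

-- ===== VERDICT (by name: the statement is the Claim_ definition above) =====
theorem normalize_brackets_py_spec : Claim_equal_normalize_brackets_py := by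
  intro path _
  unfold Spec_normalize_brackets_py normalize_brackets_py normalize_brackets_py_alt
  rw [(pvB_invariant path.toList).1 []]
  simp
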